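-- pv_equiv track=rewrite | github.com/theelefit22/nextjs-elefit | development/nextjs/backend/app.py | extract_dietary_from_prompt
-- ===== SOURCE A (Python) =====
-- def extract_dietary_from_prompt(user_prompt: str) -> dict:
--     """
--     Extract dietary restrictions and allergies mentioned in the user's text prompt.
--     Returns dict with 'dietary' and 'allergies' lists.
--     """
--     prompt_lower = user_prompt.lower()
--
--     extracted_dietary = []
--     extracted_allergies = []
--
--     # Vegetarian/Vegan detection
--     if any(term in prompt_lower for term in ['vegan', 'plant based', 'plant-based']):
--         extracted_dietary.append('vegan')
--     elif any(term in prompt_lower for term in ['vegetarian', 'veg ', 'veg,', 'veg.', ' veg', 'no meat', 'no non-veg', 'no non veg', 'no nonveg']):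
--         extracted_dietary.append('vegetarian')
--
--     # Specific restrictions
--     if any(term in prompt_lower for term in ['no dairy', 'dairy free', 'dairy-free', 'lactose intolerant', 'no milk', 'no cheese', 'no paneer']):
--         extracted_dietary.append('no dairy')
--     if any(term in prompt_lower for term in ['gluten free', 'gluten-free', 'no gluten', 'celiac']):
--         extracted_dietary.append('gluten-free')
--     if any(term in prompt_lower for term in ['no egg', 'egg free', 'egg-free', 'no eggs']):
--         extracted_dietary.append('no eggs')
--     if any(term in prompt_lower for term in ['no fish', 'no seafood', 'no shellfish']):
--         extracted_dietary.append('no seafood')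
--     if any(term in prompt_lower for term in ['no pork', 'no beef', 'no red meat']):
--         extracted_dietary.append('no red meat')
--     if any(term in prompt_lower for term in ['halal']):
--         extracted_dietary.append('halal')
--     if any(term in prompt_lower for term in ['kosher']):
--         extracted_dietary.append('kosher')
--     if any(term in prompt_lower for term in ['keto', 'ketogenic', 'low carb', 'low-carb']):
--         extracted_dietary.append('keto/low-carb')
--
--     # Allergy detection
--     if any(term in prompt_lower for term in ['nut allergy', 'allergic to nuts', 'no nuts', 'nut-free']):
--         extracted_allergies.append('nuts')
--     if any(term in prompt_lower for term in ['peanut allergy', 'allergic to peanut']):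
--         extracted_allergies.append('peanuts')
--     if any(term in prompt_lower for term in ['soy allergy', 'allergic to soy', 'no soy']):
--         extracted_allergies.append('soy')
--
--     return {'dietary': extracted_dietary, 'allergies': extracted_allergies}
-- ===== SOURCE B (Python) =====
-- # Inverted index: one flat term->tag map scanned once to build the SET of matched tags;
-- # the vegan/vegetarian elif becomes a set-level suppression; output = canonical tag
-- # orders projected through the set.
--
-- TERM_TAG = [
--     ('vegan', 'vegan'), ('plant based', 'vegan'), ('plant-based', 'vegan'),
--     ('vegetarian', 'vegetarian'), ('veg ', 'vegetarian'), ('veg,', 'vegetarian'),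
--     ('veg.', 'vegetarian'), (' veg', 'vegetarian'), ('no meat', 'vegetarian'),
--     ('no non-veg', 'vegetarian'), ('no non veg', 'vegetarian'), ('no nonveg', 'vegetarian'),
--     ('no dairy', 'no dairy'), ('dairy free', 'no dairy'), ('dairy-free', 'no dairy'),
--     ('lactose intolerant', 'no dairy'), ('no milk', 'no dairy'), ('no cheese', 'no dairy'),
--     ('no paneer', 'no dairy'),
--     ('gluten free', 'gluten-free'), ('gluten-free', 'gluten-free'),
--     ('no gluten', 'gluten-free'), ('celiac', 'gluten-free'),
--     ('no egg', 'no eggs'), ('egg free', 'no eggs'), ('egg-free', 'no eggs'), ('no eggs', 'no eggs'),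
--     ('no fish', 'no seafood'), ('no seafood', 'no seafood'), ('no shellfish', 'no seafood'),
--     ('no pork', 'no red meat'), ('no beef', 'no red meat'), ('no red meat', 'no red meat'),
--     ('halal', 'halal'),
--     ('kosher', 'kosher'),
--     ('keto', 'keto/low-carb'), ('ketogenic', 'keto/low-carb'),
--     ('low carb', 'keto/low-carb'), ('low-carb', 'keto/low-carb'),
--     ('nut allergy', 'nuts'), ('allergic to nuts', 'nuts'), ('no nuts', 'nuts'), ('nut-free', 'nuts'),
--     ('peanut allergy', 'peanuts'), ('allergic to peanut', 'peanuts'),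
--     ('soy allergy', 'soy'), ('allergic to soy', 'soy'), ('no soy', 'soy'),
-- ]
--
-- DIETARY_ORDER = ['vegan', 'vegetarian', 'no dairy', 'gluten-free', 'no eggs',
--                  'no seafood', 'no red meat', 'halal', 'kosher', 'keto/low-carb']
-- ALLERGY_ORDER = ['nuts', 'peanuts', 'soy']
--
--
-- def extract_dietary_from_prompt(user_prompt: str) -> dict:
--     p = user_prompt.lower()
--     matched = {tag for term, tag in TERM_TAG if term in p}
--     if 'vegan' in matched:
--         matched.discard('vegetarian')
--     return {'dietary': [t for t in DIETARY_ORDER if t in matched],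
--             'allergies': [t for t in ALLERGY_ORDER if t in matched]}
-- ===== Notes on version B (the rewrite author's own statement) =====
-- stated objective: alternative
-- what changed: Replaces the if/elif chain of per-group any() tests with an inverted term-to-tag index scanned once to build the set of matched tags, resolves the vegan/vegetarian exclusivity by a set discard, and projects canonical tag orders through the set.
import Mathlib
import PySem

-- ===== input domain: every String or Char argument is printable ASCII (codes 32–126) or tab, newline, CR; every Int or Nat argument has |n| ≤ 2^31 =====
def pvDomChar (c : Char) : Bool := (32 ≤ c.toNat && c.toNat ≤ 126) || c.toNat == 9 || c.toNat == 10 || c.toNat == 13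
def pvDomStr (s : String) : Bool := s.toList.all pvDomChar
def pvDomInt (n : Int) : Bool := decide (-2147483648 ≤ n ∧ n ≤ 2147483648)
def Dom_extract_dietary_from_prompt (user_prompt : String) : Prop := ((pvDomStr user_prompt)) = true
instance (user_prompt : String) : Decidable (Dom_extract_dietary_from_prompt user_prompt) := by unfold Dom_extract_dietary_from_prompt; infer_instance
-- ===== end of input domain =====

-- B replaces A's if/elif chain of per-group any() tests with an inverted term->tag index scanned
-- once into a set of matched tags, a set-level vegan/vegetarian suppression, and a projection of
-- canonical tag orders through that set (objective: alternative); same return value everywhere.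

-- ===== PORT A =====
def extract_dietary_from_prompt (user_prompt : String) : List (String × List String) :=
  let p := PySem.Str.lower user_prompt
  let d0 : List String := []
  let a0 : List String := []
  let d1 :=
    if (["vegan", "plant based", "plant-based"]).any (fun t => PySem.Str.isIn t p) then
      d0 ++ ["vegan"]
    else if (["vegetarian", "veg ", "veg,", "veg.", " veg", "no meat", "no non-veg", "no non veg", "no nonveg"]).any (fun t => PySem.Str.isIn t p) then
      d0 ++ ["vegetarian"]
    else d0
  let d2 := if (["no dairy", "dairy free", "dairy-free", "lactose intolerant", "no milk", "no cheese", "no paneer"]).any (fun t => PySem.Str.isIn t p) then d1 ++ ["no dairy"] else d1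
  let d3 := if (["gluten free", "gluten-free", "no gluten", "celiac"]).any (fun t => PySem.Str.isIn t p) then d2 ++ ["gluten-free"] else d2
  let d4 := if (["no egg", "egg free", "egg-free", "no eggs"]).any (fun t => PySem.Str.isIn t p) then d3 ++ ["no eggs"] else d3
  let d5 := if (["no fish", "no seafood", "no shellfish"]).any (fun t => PySem.Str.isIn t p) then d4 ++ ["no seafood"] else d4
  let d6 := if (["no pork", "no beef", "no red meat"]).any (fun t => PySem.Str.isIn t p) then d5 ++ ["no red meat"] else d5
  let d7 := if (["halal"]).any (fun t => PySem.Str.isIn t p) then d6 ++ ["halal"] else d6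
  let d8 := if (["kosher"]).any (fun t => PySem.Str.isIn t p) then d7 ++ ["kosher"] else d7
  let d9 := if (["keto", "ketogenic", "low carb", "low-carb"]).any (fun t => PySem.Str.isIn t p) then d8 ++ ["keto/low-carb"] else d8
  let a1 := if (["nut allergy", "allergic to nuts", "no nuts", "nut-free"]).any (fun t => PySem.Str.isIn t p) then a0 ++ ["nuts"] else a0
  let a2 := if (["peanut allergy", "allergic to peanut"]).any (fun t => PySem.Str.isIn t p) then a1 ++ ["peanuts"] else a1
  let a3 := if (["soy allergy", "allergic to soy", "no soy"]).any (fun t => PySem.Str.isIn t p) then a2 ++ ["soy"] else a2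
  [("dietary", d9), ("allergies", a3)]

-- ===== PORT B =====
def pvTermTag : List (String × String) :=
  [ ("vegan", "vegan"), ("plant based", "vegan"), ("plant-based", "vegan"),
    ("vegetarian", "vegetarian"), ("veg ", "vegetarian"), ("veg,", "vegetarian"),
    ("veg.", "vegetarian"), (" veg", "vegetarian"), ("no meat", "vegetarian"),
    ("no non-veg", "vegetarian"), ("no non veg", "vegetarian"), ("no nonveg", "vegetarian"),
    ("no dairy", "no dairy"), ("dairy free", "no dairy"), ("dairy-free", "no dairy"),
    ("lactose intolerant", "no dairy"), ("no milk", "no dairy"), ("no cheese", "no dairy"),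
    ("no paneer", "no dairy"),
    ("gluten free", "gluten-free"), ("gluten-free", "gluten-free"),
    ("no gluten", "gluten-free"), ("celiac", "gluten-free"),
    ("no egg", "no eggs"), ("egg free", "no eggs"), ("egg-free", "no eggs"), ("no eggs", "no eggs"),
    ("no fish", "no seafood"), ("no seafood", "no seafood"), ("no shellfish", "no seafood"),
    ("no pork", "no red meat"), ("no beef", "no red meat"), ("no red meat", "no red meat"),
    ("halal", "halal"),
    ("kosher", "kosher"),
    ("keto", "keto/low-carb"), ("ketogenic", "keto/low-carb"),
    ("low carb", "keto/low-carb"), ("low-carb", "keto/low-carb"),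
    ("nut allergy", "nuts"), ("allergic to nuts", "nuts"), ("no nuts", "nuts"), ("nut-free", "nuts"),
    ("peanut allergy", "peanuts"), ("allergic to peanut", "peanuts"),
    ("soy allergy", "soy"), ("allergic to soy", "soy"), ("no soy", "soy") ]

def pvDietaryOrder : List String :=
  ["vegan", "vegetarian", "no dairy", "gluten-free", "no eggs",
   "no seafood", "no red meat", "halal", "kosher", "keto/low-carb"]

def pvAllergyOrder : List String := ["nuts", "peanuts", "soy"]

def extract_dietary_from_prompt_alt (user_prompt : String) : List (String × List String) :=
  let p := PySem.Str.lower user_prompt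
  let matched0 : PySem.Set String :=
    PySem.Set.ofList (pvTermTag.filterMap (fun r => if PySem.Str.isIn r.1 p then some r.2 else none))
  let matched := if PySem.Set.contains matched0 "vegan" then PySem.Set.discard matched0 "vegetarian" else matched0
  [("dietary", pvDietaryOrder.filter (fun t => PySem.Set.contains matched t)),
   ("allergies", pvAllergyOrder.filter (fun t => PySem.Set.contains matched t))]

-- ===== PRECONDITION & SPEC =====
def Spec_extract_dietary_from_prompt (user_prompt : String) (out : List (String × List String)) : Prop := out = extract_dietary_from_prompt_alt user_prompt
instance (user_prompt : String) (out : List (String × List String)) : Decidable (Spec_extract_dietary_from_prompt user_prompt out) := by unfold Spec_extract_dietary_from_prompt; infer_instance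

-- ===== CLAIM =====
def Claim_equal_extract_dietary_from_prompt : Prop := ∀ (user_prompt : String), Dom_extract_dietary_from_prompt user_prompt → Spec_extract_dietary_from_prompt user_prompt (extract_dietary_from_prompt user_prompt)

-- ===== LEMMAS AND PROOFS =====

-- membership in the matched-tag set built from the inverted index, as a one-pass any over the index
theorem pv_contains_ofList_filterMap (L : List (String × String)) (f : String → Bool) (tag : String) :
    PySem.Set.contains (PySem.Set.ofList (L.filterMap (fun r => if f r.1 then some r.2 else none))) tag
      = L.any (fun r => r.2 == tag && f r.1) := by
  simp only [PySem.Set.contains, List.contains_eq_mem, PySem.Set.mem_ofList]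
  induction L with
  | nil => simp
  | cons a l ih =>
    rw [List.filterMap_cons]
    by_cases h : f a.1 = true
    · rw [if_pos h]
      by_cases htag : a.2 = tag
      · simp [List.any_cons, h, htag, List.mem_cons]
      · simp [List.any_cons, h, ih, List.mem_cons, BEq.comm]
    · rw [if_neg h]
      simp [List.any_cons, (Bool.not_eq_true _).mp h, ih]

theorem pv_contains_discard (s : PySem.Set String) (x y : String) :
    PySem.Set.contains (PySem.Set.discard s y) x = (!(x == y) && PySem.Set.contains s x) := by
  simp only [PySem.Set.contains, PySem.Set.discard, List.contains_eq_mem, List.mem_filter]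
  rcases h : x == y with _ | _ <;> simp_all

theorem pv_contains_ite (c : Prop) [Decidable c] (s t : PySem.Set String) (x : String) :
    PySem.Set.contains (if c then s else t) x = if c then PySem.Set.contains s x else PySem.Set.contains t x :=
  apply_ite (fun s => PySem.Set.contains s x) c s t

-- a filter over a cons as an appended segment (lets the two output shapes be compared segmentwise)
theorem pv_filter_seg {alpha : Type} (f : alpha → Bool) (a : alpha) (l : List alpha) :
    List.filter f (a :: l) = (if f a then [a] else []) ++ List.filter f l := by
  rcases h : f a with _ | _ <;> simp [h]

-- appending-on-condition commutes with pulling the segment out (A's accumulator as segments)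
theorem pv_seq_append {alpha : Type} (c : Prop) [Decidable c] (d x : List alpha) :
    (if c then d ++ x else d) = d ++ (if c then x else []) := by
  split_ifs <;> simp

-- the exclusive vegan/vegetarian head: A's if/elif block equals B's two suppressed segments
theorem pv_vegan_head (x y z : Bool) (q : Prop) [Decidable q] (T : List String) :
    (if x = true ∨ y = true ∨ z = true then ["vegan"]
     else if q then ["vegetarian"] else []) ++ T
      = (if x = true ∨ y = true ∨ z = true then ["vegan"] else []) ++
          ((if (x = false ∧ y = false ∧ z = false) ∧ q then ["vegetarian"] else []) ++ T) := by
  cases x <;> cases y <;> cases z <;> by_cases hq : q <;> simp [hq]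

-- ===== VERDICT =====
set_option maxHeartbeats 2000000 in
theorem extract_dietary_from_prompt_spec : Claim_equal_extract_dietary_from_prompt := by
  intro u _
  unfold Spec_extract_dietary_from_prompt extract_dietary_from_prompt extract_dietary_from_prompt_alt
  simp only [pv_contains_ite, pv_contains_discard,
    pv_contains_ofList_filterMap pvTermTag (fun t => PySem.Str.isIn t (PySem.Str.lower u))]
  rw [pv_seq_append, pv_seq_append, pv_seq_append, pv_seq_append, pv_seq_append,
      pv_seq_append, pv_seq_append, pv_seq_append]
  simp [pvTermTag, pvDietaryOrder, pvAllergyOrder, pv_filter_seg,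
    List.any_cons, List.any_nil, List.append_assoc, ite_self]
  constructor
  · rw [pv_vegan_head]
  · split_ifs <;> simp_all
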